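-- pv_equiv track=rewrite | github.com/joaovitormgv/financeManager | script.py | substitute_commas
-- ===== SOURCE A (Python) =====
-- def substitute_commas(lines):
--     '''
--     This function receives a list of strings and returns a list of strings with the commas substituted by dots and semicolon substituted by commas.
--
--     Banco Inter csv files are not separated by commas, but by semicolons. And the decimal separator is a comma.
--
--     :param lines: list of strings
--     '''
--
--     first_processed_lines = []
--     for line in lines:
--         new_line = ''
--         for char in line:
--             if char == ',':
--                 new_line += '.'
--             else:
--                 new_line += char
--         first_processed_lines.append(new_line)
--
--     processed_lines = []
--     for line in first_processed_lines:
--         new_line = ''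
--         for char in line:
--             if char == ';':
--                 new_line += ','
--             else:
--                 new_line += char
--         processed_lines.append(new_line)
--
--
--     return processed_lines
-- ===== SOURCE B (Python) =====
-- def substitute_commas(lines):
--     """Single-pass variant: one scan per line mapping ','->'.' and ';'->',', keyed on the original character."""
--     processed_lines = []
--     for line in lines:
--         new_line = ''
--         for char in line:
--             if char == ',':
--                 new_line += '.'
--             elif char == ';':
--                 new_line += ','
--             else:
--                 new_line += char
--         processed_lines.append(new_line)
--     return processed_lines
-- ===== Notes on version B (the rewrite author's own statement) =====
-- stated objective: simpler
-- what changed: A makes two full passes over every line (commas->dots into an intermediate list, then semicolons->commas); B does one single scan per line keyed on the original character, with no intermediate list.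
import Mathlib
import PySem

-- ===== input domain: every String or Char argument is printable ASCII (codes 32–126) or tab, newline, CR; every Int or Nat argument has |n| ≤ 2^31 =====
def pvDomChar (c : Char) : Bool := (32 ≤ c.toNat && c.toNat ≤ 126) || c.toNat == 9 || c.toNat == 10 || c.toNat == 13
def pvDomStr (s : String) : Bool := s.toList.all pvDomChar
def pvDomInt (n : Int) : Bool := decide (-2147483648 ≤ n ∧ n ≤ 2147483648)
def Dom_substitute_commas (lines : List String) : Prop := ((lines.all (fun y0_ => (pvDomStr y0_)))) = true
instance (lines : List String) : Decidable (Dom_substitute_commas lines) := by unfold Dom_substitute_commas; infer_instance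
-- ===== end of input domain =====

-- B replaces A's two sequential passes per line (commas->dots into an intermediate list, then semicolons->commas) by ONE scan per line keyed on the original character: simpler, no intermediate list.

-- ===== PORT A =====
-- pass 1 of A: ',' -> '.'
def pvA_pass1 (line : String) : String :=
  String.ofList (line.toList.foldl (fun nl c => nl ++ [if c = ',' then '.' else c]) [])

-- pass 2 of A: ';' -> ','
def pvA_pass2 (line : String) : String :=
  String.ofList (line.toList.foldl (fun nl c => nl ++ [if c = ';' then ',' else c]) [])

def substitute_commas (lines : List String) : List String :=
  let first_processed_lines := lines.foldl (fun acc line => acc ++ [pvA_pass1 line]) []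
  first_processed_lines.foldl (fun acc line => acc ++ [pvA_pass2 line]) []

-- ===== PORT B =====
def substitute_commas_alt (lines : List String) : List String :=
  lines.foldl (fun acc line =>
    acc ++ [String.ofList (line.toList.foldl
      (fun nl c => nl ++ [if c = ',' then '.' else if c = ';' then ',' else c]) [])]) []

-- ===== PRECONDITION & SPEC =====
def Spec_substitute_commas (lines : List String) (out : List String) : Prop := out = substitute_commas_alt lines
instance (lines : List String) (out : List String) : Decidable (Spec_substitute_commas lines out) := by unfold Spec_substitute_commas; infer_instance

-- ===== CLAIM (what is proved, stated in full; the proofs are below) =====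
def Claim_equal_substitute_commas : Prop := ∀ (lines : List String), Dom_substitute_commas lines → Spec_substitute_commas lines (substitute_commas lines)

-- ===== LEMMAS AND PROOFS =====

theorem pv_foldl_append_map {α β : Type} (f : α → β) :
    ∀ (l : List α) (acc : List β),
      l.foldl (fun nl c => nl ++ [f c]) acc = acc ++ l.map f := by
  intro l
  induction l with
  | nil => intro acc; simp
  | cons c t ih => intro acc; simp [List.foldl, ih]

theorem pv_passB_eq (line : String) :
    String.ofList (line.toList.foldl
      (fun nl c => nl ++ [if c = ',' then '.' else if c = ';' then ',' else c]) [])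
    = pvA_pass2 (pvA_pass1 line) := by
  simp [pvA_pass1, pvA_pass2,
        pv_foldl_append_map (fun c => if c = ',' then '.' else c),
        pv_foldl_append_map (fun c => if c = ';' then ',' else c),
        pv_foldl_append_map (fun c => if c = ',' then '.' else if c = ';' then ',' else c),
        String.toList_ofList, List.map_map]
  apply congrArg String.ofList
  apply List.map_congr_left
  intro c _
  by_cases h1 : c = ',' <;> by_cases h2 : c = ';' <;> simp [h1, h2, Function.comp]

-- ===== VERDICT (by name: the statement is the Claim_ definition above) =====
theorem substitute_commas_spec : Claim_equal_substitute_commas := by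
  intro lines _
  unfold Spec_substitute_commas substitute_commas substitute_commas_alt
  simp only [pv_foldl_append_map pvA_pass1, pv_foldl_append_map pvA_pass2,
             pv_foldl_append_map (fun (line : String) => String.ofList (line.toList.foldl
               (fun nl c => nl ++ [if c = ',' then '.' else if c = ';' then ',' else c]) [])),
             List.nil_append, List.map_map]
  apply List.map_congr_left
  intro line _
  exact (pv_passB_eq line).symm
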